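-- pv_equiv track=rewrite | github.com/DiamondJdev/landmarkBasedNavigation-2D | math2/simulateVision.py | get_local_map
-- ===== SOURCE A (Python) =====
-- def get_local_map(grid, drone_pos, view_radius):
--     x, y = drone_pos
--     local_map = []
--
--     # Generate local map based on view_radius
--     for i in range(x - view_radius, x + view_radius + 1):
--         row = []
--         for j in range(y - view_radius, y + view_radius + 1):
--             if 0 <= i < len(grid) and 0 <= j < len(grid[0]):  # Ensure within bounds
--                 row.append(grid[i][j])
--             else:
--                 row.append('#')  # Treat out-of-bound as obstacles
--         local_map.append(row)
--
--     return local_map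
-- ===== SOURCE B (Python) =====
-- def get_local_map(grid, drone_pos, view_radius):
--     x, y = drone_pos
--     r = view_radius
--     size = 2 * r + 1
--     n = len(grid)
--     m = len(grid[0]) if grid else 0
--     blank = ['#'] * size
--     pre = max(0, min(x + r + 1, 0) - (x - r))
--     post = max(0, (x + r + 1) - max(x - r, n))
--     lpad = ['#'] * max(0, min(y + r + 1, 0) - (y - r))
--     rpad = ['#'] * max(0, (y + r + 1) - max(y - r, m))
--     left = max(0, y - r)
--     right = max(0, min(m, y + r + 1))
--     out = [blank[:] for _ in range(pre)]
--     for row in grid[max(0, x - r):max(0, min(n, x + r + 1))]: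
--         out.append(lpad + list(row[left:right]) + rpad)
--     out.extend(blank[:] for _ in range(post))
--     return out
-- ===== Notes on version B (the rewrite author's own statement) =====
-- stated objective: simpler
-- what changed: Replaces A's per-cell nested loops (testing bounds for every (i,j) in the (2r+1)x(2r+1) window) by direct assembly: compute the overlap of the window with the grid once, then build the result as replicated '#' pad rows plus a slice of the grid whose rows are lpad ++ row-slice ++ rpad.
import Mathlib
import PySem

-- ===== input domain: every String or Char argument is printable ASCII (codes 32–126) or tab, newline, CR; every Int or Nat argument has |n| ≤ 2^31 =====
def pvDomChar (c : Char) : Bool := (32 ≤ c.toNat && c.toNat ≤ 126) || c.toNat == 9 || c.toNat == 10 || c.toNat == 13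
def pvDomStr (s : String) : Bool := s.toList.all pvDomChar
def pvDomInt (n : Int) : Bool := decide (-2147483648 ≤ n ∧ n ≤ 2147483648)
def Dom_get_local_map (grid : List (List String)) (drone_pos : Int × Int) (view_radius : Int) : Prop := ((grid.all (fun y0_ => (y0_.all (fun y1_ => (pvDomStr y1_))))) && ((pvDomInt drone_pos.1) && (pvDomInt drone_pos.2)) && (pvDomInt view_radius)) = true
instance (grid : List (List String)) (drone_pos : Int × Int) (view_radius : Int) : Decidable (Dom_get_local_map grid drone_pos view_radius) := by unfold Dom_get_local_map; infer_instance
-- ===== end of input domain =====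

-- B replaces A's per-cell nested loops by pad/slice/pad list assembly (simpler decomposition, same values).

-- ===== PORT A =====
-- the pyGetD defaults "#"/[] are only reached where the Python raises IndexError (excluded by Pre_)
def get_local_map (grid : List (List String)) (drone_pos : Int × Int) (view_radius : Int) : List (List String) :=
  let x := drone_pos.1
  let y := drone_pos.2
  (PySem.List.pyRange (x - view_radius) (x + view_radius + 1) 1).foldl
    (fun local_map i =>
      local_map ++
        [(PySem.List.pyRange (y - view_radius) (y + view_radius + 1) 1).foldl
          (fun row j =>
            if 0 ≤ i ∧ i < (grid.length : Int) ∧ 0 ≤ j ∧ j < ((grid.headD []).length : Int) then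
              row ++ [PySem.List.pyGetD (PySem.List.pyGetD grid i []) j "#"]
            else
              row ++ ["#"]) []]) []

-- ===== PORT B =====
def get_local_map_alt (grid : List (List String)) (drone_pos : Int × Int) (view_radius : Int) : List (List String) :=
  let x := drone_pos.1
  let y := drone_pos.2
  let r := view_radius
  let n : Int := grid.length
  let m : Int := if grid.isEmpty then 0 else ((grid.headD []).length : Int)
  let blank : List String := List.replicate (2 * r + 1).toNat "#"
  let pre := max 0 (min (x + r + 1) 0 - (x - r))
  let post := max 0 ((x + r + 1) - max (x - r) n)
  let lpad : List String := List.replicate (max 0 (min (y + r + 1) 0 - (y - r))).toNat "#"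
  let rpad : List String := List.replicate (max 0 ((y + r + 1) - max (y - r) m)).toNat "#"
  let left := max 0 (y - r)
  let right := max 0 (min m (y + r + 1))
  List.replicate pre.toNat blank
    ++ (PySem.List.slice grid (some (max 0 (x - r))) (some (max 0 (min n (x + r + 1))))).map
        (fun row => lpad ++ PySem.List.slice row (some left) (some right) ++ rpad)
    ++ List.replicate post.toNat blank

-- ===== PRECONDITION & SPEC =====
-- Pre_ excludes exactly the inputs on which A raises IndexError: some visited row grid[i]
-- is shorter than the visited column window bounded by len(grid[0]).
def Pre_get_local_map (grid : List (List String)) (drone_pos : Int × Int) (view_radius : Int) : Prop :=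
  max 0 (drone_pos.2 - view_radius) < min ((grid.headD []).length : Int) (drone_pos.2 + view_radius + 1) →
    ∀ k : Nat, k < grid.length →
      max 0 (drone_pos.1 - view_radius) ≤ (k : Int) →
      (k : Int) < drone_pos.1 + view_radius + 1 →
      min ((grid.headD []).length : Int) (drone_pos.2 + view_radius + 1) ≤ ((grid.getD k []).length : Int)

instance (grid : List (List String)) (drone_pos : Int × Int) (view_radius : Int) : Decidable (Pre_get_local_map grid drone_pos view_radius) := by unfold Pre_get_local_map; infer_instance

def pvWitness_get_local_map : List (List String) × (Int × Int) × Int := ([["a", "b"], ["c", "d"]], ((1, 1), 1))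

def Spec_get_local_map (grid : List (List String)) (drone_pos : Int × Int) (view_radius : Int) (out : List (List String)) : Prop := out = get_local_map_alt grid drone_pos view_radius
instance (grid : List (List String)) (drone_pos : Int × Int) (view_radius : Int) (out : List (List String)) : Decidable (Spec_get_local_map grid drone_pos view_radius out) := by unfold Spec_get_local_map; infer_instance

-- ===== CLAIM (what is proved, stated in full; the proofs are below) =====
def Claim_equal_get_local_map : Prop := ∀ (grid : List (List String)) (drone_pos : Int × Int) (view_radius : Int), Dom_get_local_map grid drone_pos view_radius → Pre_get_local_map grid drone_pos view_radius → Spec_get_local_map grid drone_pos view_radius (get_local_map grid drone_pos view_radius)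

-- ===== LEMMAS AND PROOFS =====

theorem map_const_pyRange {α : Type} (f : Int → α) (c : α) (a b : Int)
    (h : ∀ i, a ≤ i → i < b → f i = c) :
    (PySem.List.pyRange a b 1).map f = List.replicate (b - a).toNat c := by
  have h1 : (PySem.List.pyRange a b 1).map f = (PySem.List.pyRange a b 1).map (fun _ => c) := by
    apply List.map_congr_left
    intro i hi
    rw [PySem.List.mem_pyRange_one] at hi
    exact h i hi.1 hi.2
  rw [h1, List.map_const', PySem.List.length_pyRange_one]


theorem map_getD_pyRange {α : Type} (xs : List α) (d : α) (s t : Int)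
    (hs : 0 ≤ s) (ht : t ≤ (xs.length : Int)) :
    (PySem.List.pyRange s t 1).map (fun i => xs.getD i.toNat d)
      = (xs.drop s.toNat).take (t.toNat - s.toNat) := by
  apply List.ext_getElem
  · rw [List.length_map, PySem.List.length_pyRange_one, List.length_take, List.length_drop]
    omega
  · intro k h1 h2
    rw [List.getElem_map, PySem.List.getElem_pyRange_one]
    rw [List.getElem_take, List.getElem_drop]
    have hlen : k < (PySem.List.pyRange s t 1).length := by simpa using h1
    rw [PySem.List.length_pyRange_one] at hlen
    have hk : (s + (k : Int)).toNat = s.toNat + k := by omega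
    rw [hk, List.getD_eq_getElem]

-- the shared pad/core/pad decomposition of a clamped index window
theorem window_map {α β : Type} (f : Int → β) (g : α → β) (pad : β) (xs : List α) (d : α)
    (a b M : Int) (hab : a ≤ b) (hM : 0 ≤ M)
    (hMlen : max 0 a < min M b → min M b ≤ (xs.length : Int))
    (h0 : ∀ i, a ≤ i → i < b → i < 0 → f i = pad)
    (h1 : ∀ i, a ≤ i → i < b → 0 ≤ i → i < M → f i = g (xs.getD i.toNat d))
    (h2 : ∀ i, a ≤ i → i < b → M ≤ i → f i = pad) :
    (PySem.List.pyRange a b 1).map f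
      = List.replicate (max 0 (min b 0 - a)).toNat pad
        ++ (PySem.List.slice xs (some (max 0 a)) (some (max 0 (min M b)))).map g
        ++ List.replicate (max 0 (b - max a M)).toNat pad := by
  obtain ⟨s', hs'⟩ : ∃ s' : Int, s' = min b (max a 0) := ⟨_, rfl⟩
  obtain ⟨t', ht'⟩ : ∃ t' : Int, t' = max s' (min b M) := ⟨_, rfl⟩
  have e1 : (PySem.List.pyRange a s' 1).map f
      = List.replicate (max 0 (min b 0 - a)).toNat pad := by
    rw [map_const_pyRange f pad a s' (fun i hx hy => h0 i hx (by omega) (by omega))]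
    congr 1
    omega
  have e3 : (PySem.List.pyRange t' b 1).map f
      = List.replicate (max 0 (b - max a M)).toNat pad := by
    rw [map_const_pyRange f pad t' b (fun i hx hy => h2 i (by omega) hy (by omega))]
    congr 1
    omega
  have e2 : (PySem.List.pyRange s' t' 1).map f
      = (PySem.List.slice xs (some (max 0 a)) (some (max 0 (min M b)))).map g := by
    by_cases hcore : s' < t'
    · have hlen : min M b ≤ (xs.length : Int) := hMlen (by omega)
      have heq : ∀ i ∈ PySem.List.pyRange s' t' 1, f i = g (xs.getD i.toNat d) := by
        intro i hi
        rw [PySem.List.mem_pyRange_one] at hi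
        exact h1 i (by omega) (by omega) (by omega) (by omega)
      rw [List.map_congr_left heq]
      rw [show (fun i => g (xs.getD i.toNat d)) = g ∘ (fun i : Int => xs.getD i.toNat d) from rfl]
      rw [← List.map_map, map_getD_pyRange xs d s' t' (by omega) (by omega)]
      rw [PySem.List.slice_toNat xs (by omega) (by omega)]
      rw [show s'.toNat = (max 0 a).toNat from by omega,
          show t'.toNat - (max 0 a).toNat = (max 0 (min M b)).toNat - (max 0 a).toNat from by omega]
    · rw [PySem.List.pyRange_one_eq_nil (by omega : t' ≤ s')]
      rw [PySem.List.slice_toNat xs (by omega) (by omega)]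
      rw [show (max 0 (min M b)).toNat - (max 0 a).toNat = 0 from by omega]
      simp
  rw [PySem.List.pyRange_one_append a s' b (by omega) (by omega),
      PySem.List.pyRange_one_append s' t' b (by omega) (by omega),
      List.map_append, List.map_append, e1, e2, e3, List.append_assoc]
-- ===== VERDICT (by name: the statement is the Claim_ definition above) =====
theorem get_local_map_spec : Claim_equal_get_local_map := by
  intro grid dp r _hdom hpre
  obtain ⟨x, y⟩ := dp
  unfold Spec_get_local_map get_local_map get_local_map_alt
  simp only
  set n : Int := (grid.length : Int) with hn
  set m : Int := ((grid.headD []).length : Int) with hm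
  have hm' : (if grid.isEmpty then (0:Int) else ((grid.headD []).length : Int)) = m := by
    cases grid <;> simp [hm]
  rw [hm']
  by_cases hr : x + r + 1 ≤ x - r
  · -- empty window (view_radius < 0): both sides are []
    rw [PySem.List.pyRange_one_eq_nil hr]
    rw [PySem.List.slice_toNat grid (by omega) (by omega)]
    have h1 : (max 0 (min (x + r + 1) 0 - (x - r))).toNat = 0 := by omega
    have h2 : (max 0 ((x + r + 1) - max (x - r) n)).toNat = 0 := by omega
    have h3 : (max 0 (min n (x + r + 1))).toNat - (max 0 (x - r)).toNat = 0 := by omega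
    rw [h1, h2, h3]
    simp
  · push_neg at hr
    replace hpre : max 0 (y - r) < min ((grid.headD []).length : Int) (y + r + 1) →
        ∀ k : Nat, k < grid.length → max 0 (x - r) ≤ (k : Int) →
          (k : Int) < x + r + 1 →
          min ((grid.headD []).length : Int) (y + r + 1) ≤ ((grid.getD k []).length : Int) := hpre
    rw [PySem.List.foldl_append_singleton_eq_map, List.nil_append]
    have hmnn : 0 ≤ m := by omega
    have hnnn : 0 ≤ n := by omega
    apply window_map _ _ _ grid [] (x - r) (x + r + 1) n (by omega) hnnn
      (by intro _; omega)
    · -- rows above the grid: every cell is '#'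
      intro i hia hib hi0
      have hcell : (fun (row : List String) j =>
          if 0 ≤ i ∧ i < n ∧ 0 ≤ j ∧ j < m then
            row ++ [PySem.List.pyGetD (PySem.List.pyGetD grid i []) j "#"]
          else row ++ ["#"]) = fun row j => row ++ [(fun _ : Int => "#") j] := by
        funext row j
        rw [if_neg (by omega : ¬(0 ≤ i ∧ i < n ∧ 0 ≤ j ∧ j < m))]
      rw [hcell, PySem.List.foldl_append_singleton_eq_map, List.nil_append,
          map_const_pyRange _ "#" _ _ (fun _ _ _ => rfl)]
      congr 1
      omega
    · -- rows inside the grid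
      intro i hia hib hi0 hin
      have hprei : max 0 (y - r) < min m (y + r + 1) →
          min m (y + r + 1) ≤ ((grid.getD i.toNat []).length : Int) := by
        intro hw
        have h2 := hpre (by omega) i.toNat (by omega) (by omega) (by omega)
        omega
      have hcell : (fun (row : List String) j =>
          if 0 ≤ i ∧ i < n ∧ 0 ≤ j ∧ j < m then
            row ++ [PySem.List.pyGetD (PySem.List.pyGetD grid i []) j "#"]
          else row ++ ["#"]) = fun row j => row ++
            [if 0 ≤ i ∧ i < n ∧ 0 ≤ j ∧ j < m then
                PySem.List.pyGetD (PySem.List.pyGetD grid i []) j "#" else "#"] := by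
        funext row j
        by_cases hc : 0 ≤ i ∧ i < n ∧ 0 ≤ j ∧ j < m
        · rw [if_pos hc, if_pos hc]
        · rw [if_neg hc, if_neg hc]
      rw [hcell, PySem.List.foldl_append_singleton_eq_map, List.nil_append]
      have hwin := window_map
        (fun j => if 0 ≤ i ∧ i < n ∧ 0 ≤ j ∧ j < m then
            PySem.List.pyGetD (PySem.List.pyGetD grid i []) j "#" else "#")
        id "#" (grid.getD i.toNat []) "#" (y - r) (y + r + 1) m (by omega) hmnn hprei
        (fun j hja hjb hj0 => by
          show (if 0 ≤ i ∧ i < n ∧ 0 ≤ j ∧ j < m then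
              PySem.List.pyGetD (PySem.List.pyGetD grid i []) j "#" else "#") = "#"
          rw [if_neg (by omega : ¬(0 ≤ i ∧ i < n ∧ 0 ≤ j ∧ j < m))])
        (fun j hja hjb hj0 hjm => by
          show (if 0 ≤ i ∧ i < n ∧ 0 ≤ j ∧ j < m then
              PySem.List.pyGetD (PySem.List.pyGetD grid i []) j "#" else "#")
            = id ((grid.getD i.toNat []).getD j.toNat "#")
          rw [if_pos (⟨hi0, by omega, hj0, by omega⟩ : 0 ≤ i ∧ i < n ∧ 0 ≤ j ∧ j < m)]
          have hjlen : j < ((grid.getD i.toNat []).length : Int) := by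
            have := hprei (by omega)
            omega
          have hrow : PySem.List.pyGetD grid i [] = grid.getD i.toNat [] := by
            rw [PySem.List.pyGetD_eq_getElem grid [] hi0 (by omega)]
            exact (List.getD_eq_getElem grid [] (by omega)).symm
          rw [hrow, PySem.List.pyGetD_eq_getElem _ "#" hj0 hjlen]
          exact (List.getD_eq_getElem (grid.getD i.toNat []) "#" (by omega)).symm)
        (fun j hja hjb hjm => by
          show (if 0 ≤ i ∧ i < n ∧ 0 ≤ j ∧ j < m then
              PySem.List.pyGetD (PySem.List.pyGetD grid i []) j "#" else "#") = "#"
          rw [if_neg (by omega : ¬(0 ≤ i ∧ i < n ∧ 0 ≤ j ∧ j < m))])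
      rw [hwin, List.map_id]

    · -- rows below the grid: every cell is '#'
      intro i hia hib hin
      have hcell : (fun (row : List String) j =>
          if 0 ≤ i ∧ i < n ∧ 0 ≤ j ∧ j < m then
            row ++ [PySem.List.pyGetD (PySem.List.pyGetD grid i []) j "#"]
          else row ++ ["#"]) = fun row j => row ++ [(fun _ : Int => "#") j] := by
        funext row j
        rw [if_neg (by omega : ¬(0 ≤ i ∧ i < n ∧ 0 ≤ j ∧ j < m))]
      rw [hcell, PySem.List.foldl_append_singleton_eq_map, List.nil_append,
          map_const_pyRange _ "#" _ _ (fun _ _ _ => rfl)]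
      congr 1
      omega
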